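-- pv_equiv track=rewrite | github.com/Graphic-Kiliani/M3DLayout-code | data_curation/matterport3d/3Dbbox_top_down_part2.py | find_valid_position
-- ===== SOURCE A (Python) =====
-- def does_overlap(rect1, rect2):
--     """Check whether two rectangles overlap."""
--     x1, y1, w1, h1 = rect1
--     x2, y2, w2, h2 = rect2
--     return not (x1 + w1 <= x2 or x2 + w2 <= x1 or y1 + h1 <= y2 or y2 + h2 <= y1)
--
-- def is_in_bounds(rect, img_width, img_height):
--     """Check whether it is within the image bounds."""
--     x, y, w, h = rect
--     return x >= 0 and y >= 0 and (x + w) <= img_width and (y + h) <= img_height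
--
-- def find_valid_position(base_pos, text_size, existing_boxes, img_shape, max_radius=100):
--     """Find a non-overlapping position with minimal displacement."""
--     w, h = text_size
--     img_h, img_w = img_shape[:2]
--     cx, cy = base_pos
--
--     for radius in range(0, max_radius + 1, 2):
--         for dx in range(-radius, radius + 1, 2):
--             for dy in range(-radius, radius + 1, 2):
--                 x = cx + dx
--                 y = cy + dy
--                 rect = (x, y - h, w, h)
--                 if is_in_bounds(rect, img_w, img_h) and all(not does_overlap(rect, b) for b in existing_boxes):
--                     return (x, y), rect
--     return None, None
-- ===== SOURCE B (Python) =====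
-- def find_valid_position(base_pos, text_size, existing_boxes, img_shape, max_radius=100):
--     """Find a non-overlapping position with minimal displacement.
--
--     Staged expanding-ring search: for each even radius r the list of NEW
--     boundary-ring offsets is built up front (left column, interior
--     top/bottom pairs, right column, in the same dx-then-dy order A visits
--     them), and a single scan over these candidates returns the first fit.
--     Interior offsets of a ring were already rejected at smaller radii, so
--     the first fit is identical.
--     """
--     w, h = text_size
--     img_h, img_w = img_shape[:2]
--     cx, cy = base_pos
--
--     def ring(r):
--         if r == 0:
--             return [(0, 0)]
--         side = [-r + 2 * k for k in range(r + 1)]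
--         return ([(-r, dy) for dy in side]
--                 + [(dx, s) for dx in side[1:-1] for s in (-r, r)]
--                 + [(r, dy) for dy in side])
--
--     def valid(x, top):
--         if x < 0 or top < 0 or x + w > img_w or top + h > img_h:
--             return False
--         return all(x + w <= bx or bx + bw <= x or top + h <= by or by + bh <= top
--                    for bx, by, bw, bh in existing_boxes)
--
--     for i in range(max_radius // 2 + 1):
--         for dx, dy in ring(2 * i):
--             x, y = cx + dx, cy + dy
--             if valid(x, y - h):
--                 return (x, y), (x, y - h, w, h)
--     return None, None
-- ===== Notes on version B (the rewrite author's own statement) =====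
-- stated objective: alternative
-- what changed: B is a staged search: for each even radius it BUILDS the explicit list of new boundary-ring offsets (left column ++ interior top/bottom pairs ++ right column) and does one scan over those candidates with a fused bounds+overlap early-exit test, instead of A's triple nested loop rescanning the whole square at every radius; interior offsets were already rejected at smaller radii, so the first fit is identical.
import Mathlib
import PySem

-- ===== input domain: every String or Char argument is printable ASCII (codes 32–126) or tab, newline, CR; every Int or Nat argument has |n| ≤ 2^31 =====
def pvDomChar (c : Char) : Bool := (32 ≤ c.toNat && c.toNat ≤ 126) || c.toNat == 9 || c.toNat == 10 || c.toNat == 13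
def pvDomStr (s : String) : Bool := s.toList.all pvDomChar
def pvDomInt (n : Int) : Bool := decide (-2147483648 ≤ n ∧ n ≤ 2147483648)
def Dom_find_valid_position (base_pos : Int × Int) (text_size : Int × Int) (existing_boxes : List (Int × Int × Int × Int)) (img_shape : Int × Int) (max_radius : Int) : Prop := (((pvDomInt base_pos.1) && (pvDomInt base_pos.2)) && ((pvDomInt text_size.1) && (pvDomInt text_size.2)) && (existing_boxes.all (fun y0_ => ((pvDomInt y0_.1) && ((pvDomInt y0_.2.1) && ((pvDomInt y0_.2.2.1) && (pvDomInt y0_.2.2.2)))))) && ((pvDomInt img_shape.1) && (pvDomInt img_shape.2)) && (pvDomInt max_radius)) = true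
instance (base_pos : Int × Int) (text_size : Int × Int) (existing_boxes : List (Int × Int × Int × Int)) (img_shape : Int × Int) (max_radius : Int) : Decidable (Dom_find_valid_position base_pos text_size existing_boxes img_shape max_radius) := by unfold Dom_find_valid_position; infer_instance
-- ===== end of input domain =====

-- B builds, per even radius, the explicit list of NEW boundary-ring offsets up front and scans
-- only those candidates (A rescans the whole square at every radius): the return value is identical.

-- ===== PORT A =====
-- does_overlap(rect1, rect2)
def pv_does_overlap (rect1 rect2 : Int × Int × Int × Int) : Bool :=
  !(rect1.1 + rect1.2.2.1 ≤ rect2.1 || rect2.1 + rect2.2.2.1 ≤ rect1.1 ||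
    rect1.2.1 + rect1.2.2.2 ≤ rect2.2.1 || rect2.2.1 + rect2.2.2.2 ≤ rect1.2.1)

-- is_in_bounds(rect, img_width, img_height)
def pv_is_in_bounds (rect : Int × Int × Int × Int) (img_width img_height : Int) : Bool :=
  rect.1 ≥ 0 && rect.2.1 ≥ 0 && rect.1 + rect.2.2.1 ≤ img_width && rect.2.1 + rect.2.2.2 ≤ img_height

-- A's two inner loops: the full square of offsets at the given radius, in dx-then-dy order.
def pvSquareScan {α : Type} (v : Int → Int → Option α) (radius : Int) : Option α :=
  (PySem.List.pyRange (-radius) (radius + 1) 2).findSome? (fun dx =>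
    (PySem.List.pyRange (-radius) (radius + 1) 2).findSome? (fun dy => v dx dy))

def find_valid_position (base_pos : Int × Int) (text_size : Int × Int) (existing_boxes : List (Int × Int × Int × Int)) (img_shape : Int × Int) (max_radius : Int) : (Option (Int × Int)) × (Option (Int × Int × Int × Int)) :=
  let w := text_size.1; let h := text_size.2
  let img_h := img_shape.1; let img_w := img_shape.2
  let cx := base_pos.1; let cy := base_pos.2
  match (PySem.List.pyRange 0 (max_radius + 1) 2).findSome? (fun radius =>
          pvSquareScan (fun dx dy =>
            let x := cx + dx
            let y := cy + dy
            let rect : Int × Int × Int × Int := (x, y - h, w, h)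
            if pv_is_in_bounds rect img_w img_h &&
               existing_boxes.all (fun b => !(pv_does_overlap rect b))
            then some ((x, y), rect) else none) radius) with
  | some (pos, rect) => (some pos, some rect)
  | none => (none, none)

-- ===== PORT B =====
-- ring(r) from Source B: the boundary-ring offsets of the radius-r square, built as
-- left column ++ interior top/bottom pairs ++ right column; side[1:-1] is ported as
-- (drop 1).dropLast, exact for the nonempty lists ring produces.
def pv_ring (r : Int) : List (Int × Int) :=
  if r == 0 then [(0, 0)]
  else
    let side := (List.range (r.toNat + 1)).map (fun (k : Nat) => -r + 2 * (k : Int))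
    (side.map (fun dy => (-r, dy)))
      ++ ((side.drop 1).dropLast.flatMap (fun dx => [(dx, -r), (dx, r)]))
      ++ (side.map (fun dy => (r, dy)))

-- valid(x, top) from Source B: fused bounds + overlap early-exit test
def pv_valid (w h img_w img_h : Int) (eb : List (Int × Int × Int × Int)) (x top : Int) : Bool :=
  if x < 0 || top < 0 || x + w > img_w || top + h > img_h then false
  else eb.all (fun b =>
    x + w ≤ b.1 || b.1 + b.2.2.1 ≤ x || top + h ≤ b.2.1 || b.2.1 + b.2.2.2 ≤ top)

def find_valid_position_alt (base_pos : Int × Int) (text_size : Int × Int) (existing_boxes : List (Int × Int × Int × Int)) (img_shape : Int × Int) (max_radius : Int) : (Option (Int × Int)) × (Option (Int × Int × Int × Int)) :=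
  let w := text_size.1; let h := text_size.2
  let img_h := img_shape.1; let img_w := img_shape.2
  let cx := base_pos.1; let cy := base_pos.2
  match (List.range (PySem.Int.floordiv max_radius 2 + 1).toNat).findSome? (fun (i : Nat) =>
          (pv_ring (2 * (i : Int))).findSome? (fun d =>
            let x := cx + d.1
            let y := cy + d.2
            if pv_valid w h img_w img_h existing_boxes x (y - h)
            then some ((x, y), (x, y - h, w, h)) else none)) with
  | some (pos, rect) => (some pos, some rect)
  | none => (none, none)

-- ===== PRECONDITION & SPEC =====
def Spec_find_valid_position (base_pos : Int × Int) (text_size : Int × Int) (existing_boxes : List (Int × Int × Int × Int)) (img_shape : Int × Int) (max_radius : Int) (out : (Option (Int × Int)) × (Option (Int × Int × Int × Int))) : Prop := out = find_valid_position_alt base_pos text_size existing_boxes img_shape max_radius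
instance (base_pos : Int × Int) (text_size : Int × Int) (existing_boxes : List (Int × Int × Int × Int)) (img_shape : Int × Int) (max_radius : Int) (out : (Option (Int × Int)) × (Option (Int × Int × Int × Int))) : Decidable (Spec_find_valid_position base_pos text_size existing_boxes img_shape max_radius out) := by unfold Spec_find_valid_position; infer_instance

-- ===== CLAIM (what is proved, stated in full; the proofs are below) =====
def Claim_equal_find_valid_position : Prop := ∀ (base_pos : Int × Int) (text_size : Int × Int) (existing_boxes : List (Int × Int × Int × Int)) (img_shape : Int × Int) (max_radius : Int), Dom_find_valid_position base_pos text_size existing_boxes img_shape max_radius → Spec_find_valid_position base_pos text_size existing_boxes img_shape max_radius (find_valid_position base_pos text_size existing_boxes img_shape max_radius)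

-- ===== LEMMAS AND PROOFS =====

-- structural lemmas for step-2 ranges
lemma pyRange_two_nil (a b : Int) (h : b ≤ a) : PySem.List.pyRange a b 2 = [] := by
  rw [PySem.List.pyRange_of_pos a b (by norm_num)]
  simp [show ¬ a < b by omega]

lemma pyRange_two_cons (a b : Int) (h : a < b) : PySem.List.pyRange a b 2 = a :: PySem.List.pyRange (a + 2) b 2 := by
  rw [PySem.List.pyRange_of_pos a b (by norm_num), PySem.List.pyRange_of_pos (a + 2) b (by norm_num)]
  by_cases h2 : a + 2 < b
  · rw [if_pos h, if_pos h2,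
      show ((b - a + 2 - 1) / 2).toNat = ((b - (a + 2) + 2 - 1) / 2).toNat + 1 by omega,
      List.range_succ_eq_map]
    simp only [List.map_cons, List.map_map, Nat.cast_zero, mul_zero, add_zero]
    refine congrArg (List.cons a) (List.map_congr_left fun k _ => ?_)
    simp only [Function.comp_apply, Nat.succ_eq_add_one]
    push_cast
    ring
  · rw [if_pos h, if_neg h2,
      show ((b - a + 2 - 1) / 2).toNat = 1 by omega]
    simp

lemma pyRange_two_snoc (a b : Int) (hab : a ≤ b) (hpar : (2 : Int) ∣ b - a) :
    PySem.List.pyRange a (b + 1) 2 = PySem.List.pyRange a (b - 1) 2 ++ [b] := by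
  rw [PySem.List.pyRange_of_pos a (b + 1) (by norm_num), PySem.List.pyRange_of_pos a (b - 1) (by norm_num)]
  by_cases h2 : a < b - 1
  · rw [if_pos (by omega), if_pos h2,
      show ((b + 1 - a + 2 - 1) / 2).toNat = ((b - 1 - a + 2 - 1) / 2).toNat + 1 by omega,
      List.range_succ]
    rw [List.map_append, List.map_cons, List.map_nil]
    congr 2
    omega
  · have hab' : a = b := by omega
    subst hab'
    rw [if_pos (by omega), if_neg h2,
      show ((a + 1 - a + 2 - 1) / 2).toNat = 1 by omega]
    simp

lemma mem_pyRange_two (a b x : Int) : x ∈ PySem.List.pyRange a b 2 ↔ a ≤ x ∧ x < b ∧ (2 : Int) ∣ x - a :=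
  PySem.List.mem_pyRange_iff_of_pos (by norm_num) x

lemma findSome?_congr' {α β : Type} {f g : α → Option β} (l : List α)
    (h : ∀ x ∈ l, f x = g x) : l.findSome? f = l.findSome? g := by
  induction l with
  | nil => rfl
  | cons x xs ih =>
    simp only [List.findSome?_cons, h x (by simp)]
    cases g x with
    | some b => rfl
    | none => exact ih (fun y hy => h y (by simp [hy]))

lemma findSome?_flatMap {α β γ : Type} (l : List α) (g : α → List β) (f : β → Option γ) :
    (l.flatMap g).findSome? f = l.findSome? (fun x => (g x).findSome? f) := by
  induction l with
  | nil => rfl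
  | cons x xs ih =>
    rw [List.flatMap_cons, List.findSome?_append, List.findSome?_cons, ih]
    cases (g x).findSome? f <;> simp [Option.or]

-- Source B's `side` list is exactly A's step-2 offset range
lemma side_eq (r : Int) (h0 : 0 ≤ r) :
    (List.range (r.toNat + 1)).map (fun (k : Nat) => -r + 2 * (k : Int)) = PySem.List.pyRange (-r) (r + 1) 2 := by
  rw [PySem.List.pyRange_of_pos (-r) (r + 1) (by norm_num), if_pos (by omega),
    show ((r + 1 - -r + 2 - 1) / 2).toNat = r.toNat + 1 by omega]

-- generic step: scanning the full square (as a flattened product over a b-capped column list)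
-- equals scanning the boundary ring, when the interior I × I is all rejected
lemma squareList_eq_ringList_scan {α : Type} (v : Int → Int → Option α) (a b : Int) (I : List Int)
    (hnone : ∀ dx ∈ I, ∀ dy ∈ I, v dx dy = none) :
    ((a :: (I ++ [b])).flatMap (fun dx => (a :: (I ++ [b])).map (fun dy => (dx, dy)))).findSome? (fun d => v d.1 d.2)
    = (((a :: (I ++ [b])).map (fun dy => (a, dy)))
        ++ (I.flatMap (fun dx => ([(dx, a), (dx, b)] : List (Int × Int)))
        ++ ((a :: (I ++ [b])).map (fun dy => (b, dy))))).findSome? (fun d => v d.1 d.2) := by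
  simp only [List.flatMap_cons, List.flatMap_append, List.flatMap_nil, List.append_nil]
  rw [List.findSome?_append, List.findSome?_append, List.findSome?_append, List.findSome?_append]
  congr 2
  rw [findSome?_flatMap, findSome?_flatMap]
  refine findSome?_congr' _ fun dx hdx => ?_
  have hmidnone : List.findSome? ((fun d : Int × Int => v d.1 d.2) ∘ (fun dy => (dx, dy))) I = none :=
    List.findSome?_eq_none_iff.mpr fun dy hdy => hnone dx hdx dy hdy
  simp only [List.map_cons, List.map_append, List.map_nil, List.findSome?_cons,
    List.findSome?_append, List.findSome?_map, hmidnone]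
  cases hva : v dx a <;> cases hvb : v dx b <;> simp [List.findSome?]

-- if every grid point strictly inside the radius-r square is rejected,
-- scanning the full square equals scanning Source B's boundary-ring list
lemma squareScan_eq_ringScan {α : Type} (v : Int → Int → Option α) (r : Int) (h0 : 0 ≤ r)
    (hinv : ∀ dx dy, dx ∈ PySem.List.pyRange (-(r - 2)) (r - 1) 2 →
            dy ∈ PySem.List.pyRange (-(r - 2)) (r - 1) 2 → v dx dy = none) :
    pvSquareScan v r = (pv_ring r).findSome? (fun d => v d.1 d.2) := by
  have hnest : ∀ (S : List Int), List.findSome? (fun dx => List.findSome? (fun dy => v dx dy) S) S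
      = List.findSome? (fun d : Int × Int => v d.1 d.2) (S.flatMap (fun dx => S.map (fun dy => (dx, dy)))) := by
    intro S
    rw [findSome?_flatMap]
    refine findSome?_congr' _ fun dx _ => ?_
    rw [List.findSome?_map]
    rfl
  by_cases hr : r = 0
  · subst hr
    have h01 : PySem.List.pyRange (-(0:Int)) (0 + 1) 2 = [0] := by
      rw [show (-(0:Int)) = 0 by ring, pyRange_two_cons 0 (0 + 1) (by norm_num),
        pyRange_two_nil (0 + 2) (0 + 1) (by norm_num)]
    unfold pvSquareScan
    rw [h01, pv_ring, if_pos (by decide)]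
    cases hv : v 0 0 <;> simp [List.findSome?_cons, hv]
  · have hsplit : PySem.List.pyRange (-r) (r + 1) 2
        = -r :: (PySem.List.pyRange (-r + 2) (r - 1) 2 ++ [r]) := by
      rw [pyRange_two_cons (-r) (r + 1) (by omega),
        pyRange_two_snoc (-r + 2) r (by omega) (by omega)]
    have hnone : ∀ dx ∈ PySem.List.pyRange (-r + 2) (r - 1) 2,
        ∀ dy ∈ PySem.List.pyRange (-r + 2) (r - 1) 2, v dx dy = none := by
      intro dx hdx dy hdy
      refine hinv dx dy ?_ ?_ <;>
        · rw [show (-(r - 2) : Int) = -r + 2 by ring]; assumption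
    unfold pvSquareScan
    rw [pv_ring, if_neg (by simp [hr]), side_eq r h0, hnest, hsplit]
    simp only [List.drop_succ_cons, List.drop_zero, List.dropLast_concat]
    rw [List.append_assoc]
    exact squareList_eq_ringList_scan v (-r) r _ hnone

-- main loop invariant: outer loops of A and B agree along the radius list
lemma chain {α : Type} (v : Int → Int → Option α) :
    ∀ (n : Nat) (a b : Int), 0 ≤ a →
    (∀ dx dy, dx ∈ PySem.List.pyRange (-(a - 2)) (a - 1) 2 →
              dy ∈ PySem.List.pyRange (-(a - 2)) (a - 1) 2 → v dx dy = none) →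
    (b - a).toNat ≤ n →
    (PySem.List.pyRange a b 2).findSome? (pvSquareScan v) =
    (PySem.List.pyRange a b 2).findSome? (fun r => (pv_ring r).findSome? (fun d => v d.1 d.2)) := by
  intro n
  induction n with
  | zero =>
    intro a b h0 hinv hn
    rw [pyRange_two_nil a b (by omega)]
    rfl
  | succ n ih =>
    intro a b h0 hinv hn
    by_cases hab : a < b
    · rw [pyRange_two_cons a b hab]
      rw [List.findSome?_cons, List.findSome?_cons,
        squareScan_eq_ringScan v a h0 hinv]
      cases hh : (pv_ring a).findSome? (fun d => v d.1 d.2) with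
      | some x => rfl
      | none =>
        have hsqnone : pvSquareScan v a = none := by
          rw [squareScan_eq_ringScan v a h0 hinv, hh]
        unfold pvSquareScan at hsqnone
        have hall : ∀ dx ∈ PySem.List.pyRange (-a) (a + 1) 2,
            ∀ dy ∈ PySem.List.pyRange (-a) (a + 1) 2, v dx dy = none := by
          intro dx hdx dy hdy
          have h1 := List.findSome?_eq_none_iff.mp hsqnone dx hdx
          exact List.findSome?_eq_none_iff.mp h1 dy hdy
        refine ih (a + 2) b (by omega) ?_ (by omega)
        intro dx dy hdx hdy
        rw [mem_pyRange_two] at hdx hdy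
        exact hall dx (by rw [mem_pyRange_two]; omega) dy (by rw [mem_pyRange_two]; omega)
    · rw [pyRange_two_nil a b (by omega)]
      rfl

-- A's outer radius list equals B's: range(0, m+1, 2) = [2*i for i in range(m//2 + 1)]
lemma outer_eq (m : Int) :
    PySem.List.pyRange 0 (m + 1) 2
      = (List.range (PySem.Int.floordiv m 2 + 1).toNat).map (fun (i : Nat) => 2 * (i : Int)) := by
  rw [PySem.Int.floordiv_eq_ediv_of_pos (by norm_num),
    PySem.List.pyRange_of_pos 0 (m + 1) (by norm_num)]
  by_cases hm : (0 : Int) < m + 1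
  · rw [if_pos hm, show ((m + 1 - 0 + 2 - 1) / 2).toNat = (m / 2 + 1).toNat by omega]
    exact List.map_congr_left fun k _ => by ring
  · rw [if_neg hm, show (m / 2 + 1).toNat = 0 by omega]
    rfl

-- A's candidate test equals B's fused test
lemma cond_eq (w h img_w img_h x y : Int) (eb : List (Int × Int × Int × Int)) :
    (pv_is_in_bounds (x, y - h, w, h) img_w img_h &&
      eb.all (fun b => !(pv_does_overlap (x, y - h, w, h) b))) =
    pv_valid w h img_w img_h eb x (y - h) := by
  have hb : pv_is_in_bounds (x, y - h, w, h) img_w img_h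
      = !(decide (x < 0) || decide (y - h < 0) || decide (x + w > img_w) || decide (y - h + h > img_h)) := by
    rw [Bool.eq_iff_iff]
    simp [pv_is_in_bounds]
  have ha : (fun b : Int × Int × Int × Int => !(pv_does_overlap (x, y - h, w, h) b))
      = (fun b : Int × Int × Int × Int =>
          (decide (x + w ≤ b.1) || decide (b.1 + b.2.2.1 ≤ x) ||
           decide (y - h + h ≤ b.2.1) || decide (b.2.1 + b.2.2.2 ≤ y - h))) := by
    funext b
    simp [pv_does_overlap]
  unfold pv_valid
  rw [hb, ha]
  by_cases h1 : x < 0 <;> by_cases h2 : y - h < 0 <;>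
    by_cases h3 : x + w > img_w <;> by_cases h4 : y - h + h > img_h <;>
    simp [h1, h2, h3]

-- ===== VERDICT (by name: the statement is the Claim_ definition above) =====
theorem find_valid_position_spec : Claim_equal_find_valid_position := by
  intro base_pos text_size existing_boxes img_shape max_radius _
  unfold Spec_find_valid_position find_valid_position find_valid_position_alt
  dsimp only
  rw [show (fun dx dy : Int =>
        if pv_is_in_bounds (base_pos.1 + dx, base_pos.2 + dy - text_size.2, text_size.1, text_size.2) img_shape.2 img_shape.1 &&
           existing_boxes.all (fun b => !(pv_does_overlap (base_pos.1 + dx, base_pos.2 + dy - text_size.2, text_size.1, text_size.2) b))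
        then some ((base_pos.1 + dx, base_pos.2 + dy), (base_pos.1 + dx, base_pos.2 + dy - text_size.2, text_size.1, text_size.2)) else none) =
      (fun dx dy : Int =>
        if pv_valid text_size.1 text_size.2 img_shape.2 img_shape.1 existing_boxes (base_pos.1 + dx) (base_pos.2 + dy - text_size.2)
        then some ((base_pos.1 + dx, base_pos.2 + dy), (base_pos.1 + dx, base_pos.2 + dy - text_size.2, text_size.1, text_size.2)) else none)
      from funext fun dx => funext fun dy => by rw [cond_eq]]
  rw [chain _ ((max_radius + 1 - 0).toNat) 0 (max_radius + 1) le_rfl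
      (fun dx dy hdx _ => by rw [show -((0:Int) - 2) = 2 by ring, pyRange_two_nil 2 (0 - 1) (by omega)] at hdx; cases hdx)
      le_rfl]
  rw [outer_eq max_radius, List.findSome?_map]
  rfl
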